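-- pv_equiv track=rewrite | github.com/kaiohenricunha/kaio_cunha_PB_TP4 | questao_3.py | search_heap
-- ===== SOURCE A (Python) =====
-- def search_heap(heap, target, i=0):
--     """
--     Busca recursivamente por 'target' na heap.
--     Utiliza a propriedade de min-heap para podar a busca:
--     se o elemento atual é maior que target, nenhum elemento da subárvore pode ser target.
--     """
--     if i >= len(heap):
--         return False
--
--     # Se o nó atual for maior que o target, a subárvore não pode conter target
--     if heap[i] > target:
--         return False
--
--     # Se encontrou o target, retorna True
--     if heap[i] == target:
--         return True
--
--     left = 2 * i + 1
--     right = 2 * i + 2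
--     return search_heap(heap, target, left) or search_heap(heap, target, right)
-- ===== SOURCE B (Python) =====
-- def search_heap(heap, target, i=0):
--     n = len(heap)
--     stack = [i]
--     while stack:
--         idx = stack.pop()
--         if idx < 0 or idx >= n:
--             continue
--         if heap[idx] > target:
--             continue
--         if heap[idx] == target:
--             return True
--         stack.append(2 * idx + 1)
--         stack.append(2 * idx + 2)
--     return False
-- ===== Notes on version B (the rewrite author's own statement) =====
-- stated objective: idiomatic
-- what changed: Replaces the recursive subtree search by an iterative traversal with an explicit stack of indices, skipping out-of-range or pruned indices as they are popped.
-- outside the precondition, e.g. on search_heap([5], 5, -1): A returns True, B returns False; on search_heap([5], 3, -1): A returns False, B returns False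
import Mathlib
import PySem

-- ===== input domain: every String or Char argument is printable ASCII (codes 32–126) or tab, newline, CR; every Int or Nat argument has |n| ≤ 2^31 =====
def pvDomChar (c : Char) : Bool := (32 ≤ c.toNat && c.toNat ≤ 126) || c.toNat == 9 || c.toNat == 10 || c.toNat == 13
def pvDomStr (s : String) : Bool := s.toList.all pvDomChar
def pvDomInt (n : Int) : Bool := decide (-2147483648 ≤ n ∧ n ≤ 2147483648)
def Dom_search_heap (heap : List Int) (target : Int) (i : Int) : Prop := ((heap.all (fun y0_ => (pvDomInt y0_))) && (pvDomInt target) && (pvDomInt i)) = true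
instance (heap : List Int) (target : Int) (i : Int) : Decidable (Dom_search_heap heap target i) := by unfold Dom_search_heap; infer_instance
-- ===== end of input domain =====

-- B replaces A's recursion by an iterative traversal over an explicit stack of indices (return value only; no side effects).

-- ===== PORT A =====
-- Fuel only makes the recursion total; heap.length + 1 exceeds the recursion depth
-- whenever 0 ≤ i (the recursion indices strictly increase), so the port is exact on Pre_.
def search_heap_go (heap : List Int) (target : Int) : Nat → Int → Bool
  | 0, _ => false
  | fuel + 1, i =>
    if (heap.length : Int) ≤ i then false
    else if target < (PySem.List.pyGet? heap i).getD 0 then false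
    else if (PySem.List.pyGet? heap i).getD 0 = target then true
      else search_heap_go heap target fuel (2 * i + 1) || search_heap_go heap target fuel (2 * i + 2)

def search_heap (heap : List Int) (target : Int) (i : Int) : Bool :=
  search_heap_go heap target (heap.length + 1) i

-- ===== PORT B =====
-- Stack is a Lean list with its head as the Python list's end (pop/append site).
def search_heap_alt_weight (n : Nat) (idx : Int) : Nat :=
  if 0 ≤ idx ∧ idx < (n : Int) then 3 ^ (n - idx.toNat) else 1

def search_heap_alt_go (heap : List Int) (target : Int) : List Int → Bool
  | [] => false
  | idx :: rest =>
    if h : idx < 0 ∨ (heap.length : Int) ≤ idx then search_heap_alt_go heap target rest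
    -- heap[idx] is exact as getD: 0 ≤ idx < len is checked just above
    else if target < heap.getD idx.toNat 0 then search_heap_alt_go heap target rest
    else if heap.getD idx.toNat 0 = target then true
    else search_heap_alt_go heap target ((2 * idx + 2) :: (2 * idx + 1) :: rest)
termination_by stack => (stack.map (search_heap_alt_weight heap.length)).sum
decreasing_by
  · simp only [List.map_cons, List.sum_cons]
    have : 1 ≤ search_heap_alt_weight heap.length idx := by
      unfold search_heap_alt_weight; split <;> [exact Nat.one_le_pow _ _ (by norm_num); rfl]
    omega
  · simp only [List.map_cons, List.sum_cons]
    have : 1 ≤ search_heap_alt_weight heap.length idx := by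
      unfold search_heap_alt_weight; split <;> [exact Nat.one_le_pow _ _ (by norm_num); rfl]
    omega
  · simp only [List.map_cons, List.sum_cons]
    push_neg at h
    obtain ⟨h0, hlt⟩ := h
    set n := heap.length with hn
    have hjn : idx.toNat < n := by omega
    have hb : ∀ c : Int, (2 * idx + 1 : Int) ≤ c →
        search_heap_alt_weight n c ≤ 3 ^ (n - idx.toNat - 1) := by
      intro c hc
      unfold search_heap_alt_weight
      split
      · next hcr =>
        exact Nat.pow_le_pow_right (by norm_num) (by omega)
      · exact Nat.one_le_pow _ _ (by norm_num)
    have h1 := hb (2 * idx + 1) (le_refl _)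
    have h2 := hb (2 * idx + 2) (by omega)
    have hw : search_heap_alt_weight n idx = 3 ^ (n - idx.toNat) := by
      unfold search_heap_alt_weight; rw [if_pos ⟨by omega, by omega⟩]
    have hpow : 3 ^ (n - idx.toNat) = 3 * 3 ^ (n - idx.toNat - 1) := by
      rw [← pow_succ']
      congr 1
      omega
    have hp1 : 1 ≤ 3 ^ (n - idx.toNat - 1) := Nat.one_le_pow _ _ (by norm_num)
    omega

def search_heap_alt (heap : List Int) (target : Int) (i : Int) : Bool :=
  search_heap_alt_go heap target [i]

-- ===== PRECONDITION & SPEC =====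
-- Pre_ excludes negative i, on which A follows Python's negative-index wraparound and either
-- returns an accidental value or recurses without bound (RecursionError/IndexError).
def Pre_search_heap (heap : List Int) (target : Int) (i : Int) : Prop := 0 ≤ i
instance (heap : List Int) (target : Int) (i : Int) : Decidable (Pre_search_heap heap target i) := by unfold Pre_search_heap; infer_instance

def pvWitness_search_heap : List Int × Int × Int := ([1, 3, 2], 2, 0)

def Spec_search_heap (heap : List Int) (target : Int) (i : Int) (out : Bool) : Prop := out = search_heap_alt heap target i
instance (heap : List Int) (target : Int) (i : Int) (out : Bool) : Decidable (Spec_search_heap heap target i out) := by unfold Spec_search_heap; infer_instance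

-- ===== CLAIM (what is proved, stated in full; the proofs are below) =====
def Claim_equal_search_heap : Prop := ∀ (heap : List Int) (target : Int) (i : Int), Dom_search_heap heap target i → Pre_search_heap heap target i → Spec_search_heap heap target i (search_heap heap target i)

-- ===== LEMMAS AND PROOFS =====

-- Reference function: the pruned subtree search on Nat indices, by well-founded recursion.
def searchRef (heap : List Int) (target : Int) (j : Nat) : Bool :=
  if h : j < heap.length then
    if target < heap.getD j 0 then false
    else if heap.getD j 0 = target then true
    else searchRef heap target (2 * j + 1) || searchRef heap target (2 * j + 2)
  else false
termination_by heap.length - j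
decreasing_by all_goals omega

-- What one stack element contributes (false when out of range).
def elemRef (heap : List Int) (target : Int) (idx : Int) : Bool :=
  if 0 ≤ idx ∧ idx < (heap.length : Int) then searchRef heap target idx.toNat else false

theorem search_heap_go_eq_ref (heap : List Int) (target : Int) :
    ∀ (fuel : Nat) (j : Nat), heap.length - j < fuel →
      search_heap_go heap target fuel (j : Int) = searchRef heap target j := by
  intro fuel
  induction fuel with
  | zero => intro j h; omega
  | succ f ih =>
    intro j hf
    rw [search_heap_go, searchRef]
    by_cases hj : j < heap.length
    · rw [if_neg (by push_cast; omega), dif_pos hj]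
      have hget : (PySem.List.pyGet? heap (j : Int)).getD 0 = heap.getD j 0 := by
        simp [PySem.List.pyGet?_natCast, List.getD]
      rw [hget]
      by_cases h1 : target < heap.getD j 0
      · rw [if_pos h1, if_pos h1]
      rw [if_neg h1, if_neg h1]
      by_cases h2 : heap.getD j 0 = target
      · rw [if_pos h2, if_pos h2]
      rw [if_neg h2, if_neg h2]
      have e1 : (2 * (j : Int) + 1) = ((2 * j + 1 : Nat) : Int) := by push_cast; ring
      have e2 : (2 * (j : Int) + 2) = ((2 * j + 2 : Nat) : Int) := by push_cast; ring
      rw [e1, e2, ih (2 * j + 1) (by omega), ih (2 * j + 2) (by omega)]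
    · rw [if_pos (by push_cast; omega), dif_neg hj]

theorem refFalse (heap : List Int) (target : Int) (j : Nat) (h : ¬ j < heap.length) :
    searchRef heap target j = false := by
  rw [searchRef, dif_neg h]

theorem search_heap_alt_go_eq_any (heap : List Int) (target : Int) :
    ∀ (stack : List Int), search_heap_alt_go heap target stack = stack.any (elemRef heap target) := by
  intro stack
  fun_induction search_heap_alt_go heap target stack with
  | case1 => simp
  | case2 idx rest h ih =>
    rw [ih, List.any_cons]
    have he : elemRef heap target idx = false := by
      unfold elemRef; rw [if_neg (by omega)]
    rw [he]; simp
  | case3 idx rest h hv ih =>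
    rw [ih, List.any_cons]
    push_neg at h
    have he : elemRef heap target idx = false := by
      unfold elemRef
      rw [if_pos ⟨h.1, h.2⟩, searchRef, dif_pos (by omega), if_pos hv]
    rw [he]; simp
  | case4 idx rest h hv heq =>
    rw [List.any_cons]
    push_neg at h
    have he : elemRef heap target idx = true := by
      unfold elemRef
      rw [if_pos ⟨h.1, h.2⟩, searchRef, dif_pos (by omega), if_neg hv, if_pos heq]
    rw [he]; simp
  | case5 idx rest h hv hne ih =>
    rw [ih]
    simp only [List.any_cons]
    push_neg at h
    have he : elemRef heap target idx =
        (elemRef heap target (2 * idx + 1) || elemRef heap target (2 * idx + 2)) := by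
      unfold elemRef
      rw [if_pos ⟨h.1, h.2⟩, searchRef, dif_pos (by omega), if_neg hv, if_neg hne]
      have h0 : 0 ≤ idx := h.1
      have c1 : (0 ≤ 2 * idx + 1 ∧ 2 * idx + 1 < (heap.length : Int)) ↔ 2 * idx.toNat + 1 < heap.length := by omega
      have c2 : (0 ≤ 2 * idx + 2 ∧ 2 * idx + 2 < (heap.length : Int)) ↔ 2 * idx.toNat + 2 < heap.length := by omega
      have t1 : (2 * idx + 1).toNat = 2 * idx.toNat + 1 := by omega
      have t2 : (2 * idx + 2).toNat = 2 * idx.toNat + 2 := by omega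
      by_cases hc1 : 2 * idx.toNat + 1 < heap.length
      · rw [if_pos (c1.mpr hc1), t1]
        by_cases hc2 : 2 * idx.toNat + 2 < heap.length
        · rw [if_pos (c2.mpr hc2), t2]
        · rw [if_neg (fun hh => hc2 (c2.mp hh)), refFalse heap target (2 * idx.toNat + 2) (by omega)]
      · rw [if_neg (fun hh => hc1 (c1.mp hh)), refFalse heap target (2 * idx.toNat + 1) (by omega)]
        by_cases hc2 : 2 * idx.toNat + 2 < heap.length
        · rw [if_pos (c2.mpr hc2), t2]
        · rw [if_neg (fun hh => hc2 (c2.mp hh)), refFalse heap target (2 * idx.toNat + 2) (by omega)]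
    rw [he]
    cases elemRef heap target (2 * idx + 1) <;> cases elemRef heap target (2 * idx + 2) <;> simp

-- ===== VERDICT (by name: the statement is the Claim_ definition above) =====
theorem search_heap_spec : Claim_equal_search_heap := by
  intro heap target i _ hpre
  unfold Spec_search_heap search_heap search_heap_alt
  rw [search_heap_alt_go_eq_any]
  simp only [List.any_cons, List.any_nil, Bool.or_false]
  unfold Pre_search_heap at hpre
  obtain ⟨j, rfl⟩ : ∃ j : Nat, i = (j : Int) := ⟨i.toNat, by omega⟩
  rw [search_heap_go_eq_ref heap target _ j (by omega)]
  by_cases hlt : (j : Int) < (heap.length : Int)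
  · unfold elemRef
    rw [if_pos ⟨by omega, hlt⟩]
    simp
  · unfold elemRef
    rw [if_neg (by omega), refFalse heap target j (by omega)]
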